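-- pv_equiv track=rewrite | github.com/tanmnguyen/DeepFakeSpeechEngine | egs/tedlium/scripts/compute_melspectrogram.py | split_segment_dict
-- ===== SOURCE A (Python) =====
-- def split_segment_dict(segment_dict, nprocs):
--     n_dicts = len(segment_dict)
--     n_dicts_per_proc = n_dicts // nprocs
--
--     segment_dict_per_proc = []
--     for i in range(nprocs):
--         start = i * n_dicts_per_proc
--         end = n_dicts if i == nprocs - 1 else (i + 1) * n_dicts_per_proc
--
--         segment_dict_per_proc.append({k: segment_dict[k] for k in list(segment_dict.keys())[start:end]})
--
--     return segment_dict_per_proc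
-- ===== SOURCE B (Python) =====
-- def split_segment_dict(segment_dict, nprocs):
--     q = len(segment_dict) // nprocs
--     rest = list(segment_dict.items())
--     out = []
--     for _ in range(nprocs - 1):
--         out.append(dict(rest[:q]))
--         rest = rest[q:]
--     out.append(dict(rest))
--     return out
-- ===== Notes on version B (the rewrite author's own statement) =====
-- stated objective: simpler
-- what changed: Replaces the range(nprocs) loop with per-bucket start/end index arithmetic, key-list slicing and per-key dict lookups by a loop that peels the first q items off the remaining item stream for each bucket and gives the whole remainder to the last bucket; no indices and no lookups.
-- outside the precondition, e.g. on split_segment_dict({'a': 1}, -1): A returns [], B returns [{'a': 1}]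
import Mathlib
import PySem

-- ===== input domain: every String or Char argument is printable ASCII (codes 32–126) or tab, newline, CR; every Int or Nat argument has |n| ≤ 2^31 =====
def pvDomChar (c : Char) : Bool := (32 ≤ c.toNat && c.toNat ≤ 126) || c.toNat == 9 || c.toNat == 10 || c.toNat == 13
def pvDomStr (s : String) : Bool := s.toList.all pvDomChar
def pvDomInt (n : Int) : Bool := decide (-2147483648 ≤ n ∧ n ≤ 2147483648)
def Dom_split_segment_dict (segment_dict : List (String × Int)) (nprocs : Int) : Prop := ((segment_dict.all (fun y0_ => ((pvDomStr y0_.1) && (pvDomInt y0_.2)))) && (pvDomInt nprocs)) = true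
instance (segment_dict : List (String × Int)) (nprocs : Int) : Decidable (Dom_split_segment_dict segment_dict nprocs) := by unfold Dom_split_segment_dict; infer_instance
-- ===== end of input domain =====

-- B replaces A's indexed start/end slicing over range(nprocs) and per-key dict-comprehension
-- lookups by a loop peeling q items per bucket off the item stream (simpler; not faster).


-- ===== PORT A =====
def split_segment_dict (segment_dict : List (String × Int)) (nprocs : Int) : List (List (String × Int)) :=
  let n_dicts : Int := segment_dict.length
  let n_dicts_per_proc : Int := PySem.Int.floordiv n_dicts nprocs
  (PySem.List.pyRange 0 nprocs 1).foldl (fun acc i =>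
    let start := i * n_dicts_per_proc
    let «end» := if i = nprocs - 1 then n_dicts else (i + 1) * n_dicts_per_proc
    acc ++ [((PySem.List.slice (segment_dict.map Prod.fst) (some start) (some «end»)).foldl
        (fun d k => d.insert k (((PySem.Dict.mk segment_dict).get? k).getD 0))
        (PySem.Dict.empty : PySem.Dict String Int)).items]) []

-- ===== PORT B =====
def split_segment_dict_alt (segment_dict : List (String × Int)) (nprocs : Int) : List (List (String × Int)) :=
  let q : Int := PySem.Int.floordiv segment_dict.length nprocs
  let p := (PySem.List.pyRange 0 (nprocs - 1) 1).foldl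
    (fun (st : List (List (String × Int)) × List (String × Int)) (_ : Int) =>
      (st.1 ++ [(PySem.Dict.ofList (PySem.List.slice st.2 none (some q))).items],
       PySem.List.slice st.2 (some q) none))
    ([], segment_dict)
  p.1 ++ [(PySem.Dict.ofList p.2).items]

-- ===== PRECONDITION & SPEC =====
-- Pre_ excludes nonpositive nprocs (A raises ZeroDivisionError at nprocs = 0, and for negative
-- nprocs returns [] silently discarding all entries — outside the task's natural domain), and
-- association lists with duplicate keys, which do not represent any Python dict input.
def Pre_split_segment_dict (segment_dict : List (String × Int)) (nprocs : Int) : Prop :=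
  1 ≤ nprocs ∧ (segment_dict.map Prod.fst).Nodup
instance (segment_dict : List (String × Int)) (nprocs : Int) : Decidable (Pre_split_segment_dict segment_dict nprocs) := by unfold Pre_split_segment_dict; infer_instance

def pvWitness_split_segment_dict : (List (String × Int)) × Int := ([("a", 1), ("b", 2), ("c", 3)], 2)

def Spec_split_segment_dict (segment_dict : List (String × Int)) (nprocs : Int) (out : List (List (String × Int))) : Prop := out = split_segment_dict_alt segment_dict nprocs
instance (segment_dict : List (String × Int)) (nprocs : Int) (out : List (List (String × Int))) : Decidable (Spec_split_segment_dict segment_dict nprocs out) := by unfold Spec_split_segment_dict; infer_instance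

-- ===== CLAIM (what is proved, stated in full; the proofs are below) =====
def Claim_equal_split_segment_dict : Prop := ∀ (segment_dict : List (String × Int)) (nprocs : Int), Dom_split_segment_dict segment_dict nprocs → Pre_split_segment_dict segment_dict nprocs → Spec_split_segment_dict segment_dict nprocs (split_segment_dict segment_dict nprocs)

-- ===== LEMMAS AND PROOFS =====

-- foldl that appends one element per step is a map
theorem pv_foldl_append_map {α β : Type} (l : List α) (f : α → β) (acc : List β) :
    l.foldl (fun a i => a ++ [f i]) acc = acc ++ l.map f := by
  induction l generalizing acc with
  | nil => simp
  | cons x xs ih => simp [List.foldl_cons, ih]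

-- inserting a list of fresh, mutually distinct keys appends the pairs in order
theorem pv_update_fresh (l : List (String × Int)) (d : PySem.Dict String Int)
    (hnd : (l.map Prod.fst).Nodup) (hfresh : ∀ p ∈ l, d.contains p.1 = false) :
    (l.foldl (fun acc p => acc.insert p.1 p.2) d).items = d.items ++ l := by
  induction l generalizing d with
  | nil => simp
  | cons p l ih =>
    have hpf : d.contains p.1 = false := hfresh p (by simp)
    have hins : (d.insert p.1 p.2).items = d.items ++ [p] := by
      simp [PySem.Dict.insert, hpf]
    have hfresh' : ∀ r ∈ l, (d.insert p.1 p.2).contains r.1 = false := by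
      intro r hr
      have hne : r.1 ≠ p.1 := by
        simp only [List.map_cons, List.nodup_cons] at hnd
        intro h; exact hnd.1 (h ▸ List.mem_map_of_mem hr)
      have : d.contains r.1 = false := hfresh r (List.mem_cons_of_mem _ hr)
      simp only [PySem.Dict.contains, hins] at this ⊢
      simp only [List.any_append, List.any_cons, List.any_nil, this]
      simp only [Bool.false_or, Bool.or_false]
      exact decide_eq_false (fun h => hne h.symm)
    have hnd' : (l.map Prod.fst).Nodup := by
      simp only [List.map_cons, List.nodup_cons] at hnd; exact hnd.2
    simp only [List.foldl_cons]
    rw [ih _ hnd' hfresh', hins]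
    simp
-- dict(pairs) on a duplicate-free pair list is the identity
theorem pv_ofList_nodup (l : List (String × Int)) (hnd : (l.map Prod.fst).Nodup) :
    (PySem.Dict.ofList l).items = l := by
  have := pv_update_fresh l PySem.Dict.empty hnd (by intro p _; rfl)
  simpa [PySem.Dict.ofList, PySem.Dict.update, PySem.Dict.empty] using this

-- the dict comprehension {k: sd[k] for k in (chunk of sd's keys)} rebuilds the chunk
theorem pv_dictcomp (sd : List (String × Int)) (hsd : (sd.map Prod.fst).Nodup)
    (l : List (String × Int)) (hl : l.Sublist sd) :
    ((l.map Prod.fst).foldl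
        (fun d k => d.insert k (((PySem.Dict.mk sd).get? k).getD 0))
        (PySem.Dict.empty : PySem.Dict String Int)).items = l := by
  have hnd : (l.map Prod.fst).Nodup := (hl.map Prod.fst).nodup hsd
  rw [List.foldl_map]
  have hcongr : l.foldl
      (fun d p => d.insert p.1 (((PySem.Dict.mk sd).get? p.1).getD 0))
      (PySem.Dict.empty : PySem.Dict String Int)
      = l.foldl (fun d p => d.insert p.1 p.2) PySem.Dict.empty := by
    apply PySem.List.foldl_congr_mem
    intro d p hp
    have hmem : (p.1, p.2) ∈ (PySem.Dict.mk sd).items := hl.mem hp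
    have : (PySem.Dict.mk sd).get? p.1 = some p.2 :=
      PySem.Dict.get?_of_mem_items _ hmem hsd
    simp [this]
  rw [hcongr, pv_update_fresh l _ hnd (by intro p _; rfl)]
  rfl

-- closed form of B's loop, Nat-range form: q-sized chunks off the front of rest
theorem pv_loopB_nat (qn : Nat) (n : Nat) (rest : List (String × Int))
    (acc : List (List (String × Int))) (hnd : (rest.map Prod.fst).Nodup) :
    (List.range n).foldl
        (fun (st : List (List (String × Int)) × List (String × Int)) (_ : Nat) =>
          (st.1 ++ [(PySem.Dict.ofList (st.2.take qn)).items], st.2.drop qn))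
        (acc, rest)
      = (acc ++ (List.range n).map (fun t => (rest.drop (t * qn)).take qn),
         rest.drop (n * qn)) := by
  induction n with
  | zero => simp
  | succ n ih =>
    rw [List.range_succ, List.foldl_append, ih]
    simp only [List.foldl_cons, List.foldl_nil, List.map_append, List.map_cons, List.map_nil]
    have hnd' : (((rest.drop (n * qn)).take qn).map Prod.fst).Nodup :=
      (((List.take_sublist _ _).trans (List.drop_sublist _ _)).map Prod.fst).nodup hnd
    rw [pv_ofList_nodup _ hnd', List.drop_drop]
    simp [Nat.succ_mul, Nat.add_comm, List.append_assoc]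

-- the same loop as B's port writes it: over pyRange, slices phrased with an Int bound
theorem pv_loopB (q : Int) (qn : Nat) (hq : q = (qn : Int)) (b : Int)
    (rest : List (String × Int)) (acc : List (List (String × Int)))
    (hnd : (rest.map Prod.fst).Nodup) :
    (PySem.List.pyRange 0 b 1).foldl
        (fun (st : List (List (String × Int)) × List (String × Int)) (_ : Int) =>
          (st.1 ++ [(PySem.Dict.ofList (PySem.List.slice st.2 none (some q))).items],
           PySem.List.slice st.2 (some q) none))
        (acc, rest)
      = (acc ++ (List.range b.toNat).map (fun t => (rest.drop (t * qn)).take qn),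
         rest.drop (b.toNat * qn)) := by
  rw [PySem.List.pyRange_one, List.foldl_map]
  simp only [Int.sub_zero]
  have hfun : ∀ (st : List (List (String × Int)) × List (String × Int)) (k : Nat),
      (st.1 ++ [(PySem.Dict.ofList (PySem.List.slice st.2 none (some q))).items],
       PySem.List.slice st.2 (some q) none)
      = (st.1 ++ [(PySem.Dict.ofList (st.2.take qn)).items], st.2.drop qn) := by
    intro st _
    rw [hq, PySem.List.slice_to _ (by positivity), PySem.List.slice_from _ (by positivity)]
    simp
  rw [PySem.List.foldl_congr_mem _ _ _ _ (fun acc x hx => hfun acc x)]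
  exact pv_loopB_nat qn b.toNat rest acc hnd

-- ===== VERDICT (by name: the statement is the Claim_ definition above) =====
theorem split_segment_dict_spec : Claim_equal_split_segment_dict := by
  intro sd nprocs _hdom hpre
  obtain ⟨hnp, hnd⟩ := hpre
  unfold Spec_split_segment_dict
  have hq0 : 0 ≤ PySem.Int.floordiv (sd.length : Int) nprocs := by
    rw [PySem.Int.floordiv_eq_ediv_of_pos (by omega)]
    exact Int.ediv_nonneg (by positivity) (by omega)
  set np : Nat := nprocs.toNat with hnp'
  have hnpc : (np : Int) = nprocs := Int.toNat_of_nonneg (by omega)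
  have hnp1 : 1 ≤ np := by omega
  set qn : Nat := (PySem.Int.floordiv (sd.length : Int) nprocs).toNat with hqn
  have hqc : (qn : Int) = PySem.Int.floordiv (sd.length : Int) nprocs :=
    Int.toNat_of_nonneg hq0
  have hB : split_segment_dict_alt sd nprocs =
      (List.range (np - 1)).map (fun t => (sd.drop (t * qn)).take qn)
        ++ [sd.drop ((np - 1) * qn)] := by
    unfold split_segment_dict_alt
    dsimp only
    rw [pv_loopB _ qn hqc.symm _ sd [] hnd]
    have hb : (nprocs - 1).toNat = np - 1 := by omega
    rw [hb]
    have hnd' : ((sd.drop ((np - 1) * qn)).map Prod.fst).Nodup :=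
      ((List.drop_sublist _ _).map Prod.fst).nodup hnd
    rw [pv_ofList_nodup _ hnd']
    simp
  rw [hB]
  unfold split_segment_dict
  rw [PySem.List.pyRange_one, pv_foldl_append_map]
  simp only [List.nil_append, List.map_map, Int.sub_zero, zero_add]
  have hsplit : List.range (nprocs.toNat) = List.range (np - 1) ++ [np - 1] := by
    obtain ⟨j, hj⟩ : ∃ j, np = j + 1 := ⟨np - 1, by omega⟩
    rw [show nprocs.toNat = np from rfl, hj]
    simp [List.range_succ]
  rw [hsplit, List.map_append]
  congr 1
  · apply List.map_congr_left
    intro k hk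
    rw [List.mem_range] at hk
    simp only [Function.comp_apply]
    have hne : ¬ ((k : Int) = nprocs - 1) := by omega
    rw [if_neg hne]
    have ha : (k : Int) * PySem.Int.floordiv (sd.length : Int) nprocs
        = ((k * qn : Nat) : Int) := by rw [← hqc]; push_cast; ring
    have hb : ((k : Int) + 1) * PySem.Int.floordiv (sd.length : Int) nprocs
        = (((k + 1) * qn : Nat) : Int) := by rw [← hqc]; push_cast; ring
    rw [ha, hb, PySem.List.slice_natCast]
    rw [show (k + 1) * qn - k * qn = qn by simp [Nat.succ_mul]]
    rw [← List.map_drop, ← List.map_take]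
    have hsub : ((sd.drop (k * qn)).take qn).Sublist sd :=
      (List.take_sublist _ _).trans (List.drop_sublist _ _)
    exact pv_dictcomp sd hnd _ hsub
  · simp only [List.map_cons, List.map_nil, Function.comp_apply]
    have heq : ((np - 1 : Nat) : Int) = nprocs - 1 := by omega
    rw [if_pos heq]
    have ha : ((np - 1 : Nat) : Int) * PySem.Int.floordiv (sd.length : Int) nprocs
        = (((np - 1) * qn : Nat) : Int) := by rw [← hqc]; push_cast; ring
    rw [ha, PySem.List.slice_natCast]
    have hlen : ((List.map Prod.fst sd).drop ((np - 1) * qn)).length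
        ≤ sd.length - (np - 1) * qn := by simp
    rw [List.take_of_length_le hlen]
    rw [← List.map_drop]
    exact congrArg (fun x => [x]) (pv_dictcomp sd hnd _ (List.drop_sublist _ _))
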